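-- pv_equiv track=rewrite | github.com/davidalvarez2003/TCA-for-ice-models | TCA, Fmodel.py | calcular_polarizacion
-- ===== SOURCE A (Python) =====
-- def calcular_polarizacion(cuadricula, n, m):
--     polarizacion = 0
--
--     # Recorremos toda la cuadrícula
--     for fila in range(n):
--         for col in range(m):
--             valor_actual = cuadricula[fila][col]
--
--             # Comparamos con los vecinos (arriba, abajo, izquierda, derecha)
--             flecha = 0  # Si no hay flecha hacia arriba, será 0 por defecto
--             # Arriba
--             if fila > 0 and cuadricula[fila-1][col] > valor_actual:
--                 flecha = -1
--             # Abajo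
--             elif fila < n-1 and cuadricula[fila+1][col] > valor_actual:   #Para adaptar esto a un modelo de Rys en el que se favorecen interacciones 5 y 6 se cambia < por >
--                 flecha = -1
--             # Izquierda
--             elif col > 0 and cuadricula[fila][col-1] > valor_actual:
--                 flecha = -1
--             # Derecha
--             elif col < m-1 and cuadricula[fila][col+1] > valor_actual:
--                 flecha = -1
--
--             # Sumamos las flechas que apuntan hacia arriba (flecha == 1)
--             polarizacion += flecha
--
--     return polarizacion
-- ===== SOURCE B (Python) =====
-- def calcular_polarizacion(cuadricula, n, m):
--     # Pair-pass reformulation: the result is minus the number of window cells that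
--     # have a strictly greater orthogonal neighbour.  Walk each adjacent pair once
--     # (horizontal then vertical) and mark the strictly smaller cell of every
--     # differing pair; return minus the number of marked cells.
--     marcadas = set()
--     for f in range(n):
--         for c in range(m - 1):
--             a, b = cuadricula[f][c], cuadricula[f][c + 1]
--             if a < b:
--                 marcadas.add((f, c))
--             elif b < a:
--                 marcadas.add((f, c + 1))
--     for f in range(n - 1):
--         for c in range(m):
--             a, b = cuadricula[f][c], cuadricula[f + 1][c]
--             if a < b:
--                 marcadas.add((f, c))
--             elif b < a:
--                 marcadas.add((f + 1, c))
--     return -len(marcadas)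
-- ===== Notes on version B (the rewrite author's own statement) =====
-- stated objective: alternative
-- what changed: Instead of A's per-cell elif chain over the four neighbours, B makes one pass over horizontal adjacent pairs and one over vertical pairs, adds the strictly smaller cell of every differing pair to a set, and returns minus the set's size.
import Mathlib
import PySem

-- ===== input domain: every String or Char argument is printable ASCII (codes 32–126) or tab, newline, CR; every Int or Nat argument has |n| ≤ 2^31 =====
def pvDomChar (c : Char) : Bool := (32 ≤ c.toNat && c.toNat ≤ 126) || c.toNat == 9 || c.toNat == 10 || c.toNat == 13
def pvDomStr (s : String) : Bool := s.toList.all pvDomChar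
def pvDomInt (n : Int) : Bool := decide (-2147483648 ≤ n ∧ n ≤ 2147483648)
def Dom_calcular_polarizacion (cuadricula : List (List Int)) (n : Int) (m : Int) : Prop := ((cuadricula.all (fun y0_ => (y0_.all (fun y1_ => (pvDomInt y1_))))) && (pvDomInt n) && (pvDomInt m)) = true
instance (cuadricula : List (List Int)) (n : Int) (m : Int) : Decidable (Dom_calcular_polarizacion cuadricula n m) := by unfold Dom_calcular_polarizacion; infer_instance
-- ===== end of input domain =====

-- B replaces A's per-cell four-neighbour elif chain by two passes over adjacent pairs
-- (horizontal, then vertical) that put the strictly smaller cell of each differing pair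
-- into a set, returning minus the set's size (objective: alternative decomposition).

-- cuadricula[f][c], total form; Pre_ guarantees every access the Python makes is in range,
-- where pyGetD is exact.
def pvCell (cuadricula : List (List Int)) (f c : Int) : Int :=
  PySem.List.pyGetD (PySem.List.pyGetD cuadricula f []) c 0

-- ===== PORT A =====
def calcular_polarizacion (cuadricula : List (List Int)) (n : Int) (m : Int) : Int :=
  (PySem.List.pyRange 0 n 1).foldl (fun polarizacion fila =>
    (PySem.List.pyRange 0 m 1).foldl (fun polarizacion col =>
      let valor_actual := pvCell cuadricula fila col
      let flecha : Int :=
        if fila > 0 ∧ pvCell cuadricula (fila-1) col > valor_actual then -1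
        else if fila < n-1 ∧ pvCell cuadricula (fila+1) col > valor_actual then -1
        else if col > 0 ∧ pvCell cuadricula fila (col-1) > valor_actual then -1
        else if col < m-1 ∧ pvCell cuadricula fila (col+1) > valor_actual then -1
        else 0
      polarizacion + flecha) polarizacion) 0

-- ===== PORT B =====
def calcular_polarizacion_alt (cuadricula : List (List Int)) (n : Int) (m : Int) : Int :=
  let horiz : PySem.Set (Int × Int) :=
    (PySem.List.pyRange 0 n 1).foldl (fun marcadas f =>
      (PySem.List.pyRange 0 (m-1) 1).foldl (fun marcadas c =>
        let a := pvCell cuadricula f c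
        let b := pvCell cuadricula f (c+1)
        if a < b then PySem.Set.add marcadas (f, c)
        else if b < a then PySem.Set.add marcadas (f, c+1)
        else marcadas) marcadas) PySem.Set.empty
  let marcadas : PySem.Set (Int × Int) :=
    (PySem.List.pyRange 0 (n-1) 1).foldl (fun marcadas f =>
      (PySem.List.pyRange 0 m 1).foldl (fun marcadas c =>
        let a := pvCell cuadricula f c
        let b := pvCell cuadricula (f+1) c
        if a < b then PySem.Set.add marcadas (f, c)
        else if b < a then PySem.Set.add marcadas (f+1, c)
        else marcadas) marcadas) horiz
  Neg.neg (PySem.Set.len marcadas)   -- return -len(marcadas)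

-- ===== PRECONDITION & SPEC =====
-- Exactly where Python A returns: when both loops run (0 < n and 0 < m), every accessed
-- row and entry must exist, otherwise Python raises IndexError; with n ≤ 0 or m ≤ 0 no
-- element is ever accessed and A returns 0.
def Pre_calcular_polarizacion (cuadricula : List (List Int)) (n : Int) (m : Int) : Prop :=
  0 < n → 0 < m →
    (n ≤ (cuadricula.length : Int) ∧
     ∀ row ∈ cuadricula.take n.toNat, m ≤ (row.length : Int))
instance (cuadricula : List (List Int)) (n : Int) (m : Int) : Decidable (Pre_calcular_polarizacion cuadricula n m) := by unfold Pre_calcular_polarizacion; infer_instance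

def pvWitness_calcular_polarizacion : List (List Int) × Int × Int := ([[1, 2], [3, 4]], 2, 2)

def Spec_calcular_polarizacion (cuadricula : List (List Int)) (n : Int) (m : Int) (out : Int) : Prop := out = calcular_polarizacion_alt cuadricula n m
instance (cuadricula : List (List Int)) (n : Int) (m : Int) (out : Int) : Decidable (Spec_calcular_polarizacion cuadricula n m out) := by unfold Spec_calcular_polarizacion; infer_instance

-- ===== CLAIM (what is proved, stated in full; the proofs are below) =====
def Claim_equal_calcular_polarizacion : Prop := ∀ (cuadricula : List (List Int)) (n : Int) (m : Int), Dom_calcular_polarizacion cuadricula n m → Pre_calcular_polarizacion cuadricula n m → Spec_calcular_polarizacion cuadricula n m (calcular_polarizacion cuadricula n m)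

-- ===== LEMMAS AND PROOFS =====

-- A window cell is "bad" when some orthogonal neighbour inside the window is strictly
-- greater: the disjunction of A's four elif conditions.
def pvBad (g : List (List Int)) (n m : Int) (p : Int × Int) : Bool :=
  decide ((0 < p.1 ∧ pvCell g p.1 p.2 < pvCell g (p.1-1) p.2) ∨
          (p.1 < n-1 ∧ pvCell g p.1 p.2 < pvCell g (p.1+1) p.2) ∨
          (0 < p.2 ∧ pvCell g p.1 p.2 < pvCell g p.1 (p.2-1)) ∨
          (p.2 < m-1 ∧ pvCell g p.1 p.2 < pvCell g p.1 (p.2+1)))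

-- the n×m index window, row-major
def pvWin (n m : Int) : List (Int × Int) :=
  (PySem.List.pyRange 0 n 1).flatMap (fun f => (PySem.List.pyRange 0 m 1).map (Prod.mk f))

lemma pv_flecha (g : List (List Int)) (n m f c : Int) :
  (if f > 0 ∧ pvCell g (f-1) c > pvCell g f c then (-1:Int)
   else if f < n-1 ∧ pvCell g (f+1) c > pvCell g f c then -1
   else if c > 0 ∧ pvCell g f (c-1) > pvCell g f c then -1
   else if c < m-1 ∧ pvCell g f (c+1) > pvCell g f c then -1
   else 0) = if pvBad g n m (f, c) then -1 else 0 := by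
  simp only [pvBad, gt_iff_lt]
  split_ifs with h1 h2 h3 h4 h5 <;> simp_all <;> omega

lemma pv_sum_map_ite_neg_one {α : Type} (p : α → Bool) (l : List α) :
    (l.map (fun x => if p x then (-1 : Int) else 0)).sum = -(l.countP p : Int) := by
  induction l with
  | nil => simp
  | cons x xs ih => by_cases h : p x <;> simp [h, ih]

lemma pv_A_eq_count (g : List (List Int)) (n m : Int) :
    calcular_polarizacion g n m = -(((pvWin n m).countP (pvBad g n m) : Int)) := by
  unfold calcular_polarizacion
  rw [List.foldl_ext _ (fun pol fila => pol + -(((PySem.List.pyRange 0 m 1).countP (fun c => pvBad g n m (fila, c)) : Int)))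
      (H := by
        intro pol fila _
        simp only []
        rw [List.foldl_ext _ (fun pol col => pol + (if pvBad g n m (fila, col) then (-1:Int) else 0))
            (H := by intro pol col _; simp only []; rw [pv_flecha])]
        rw [PySem.List.foldl_add _ (fun col => if pvBad g n m (fila, col) then (-1:Int) else 0)]
        rw [pv_sum_map_ite_neg_one])]
  rw [PySem.List.foldl_add _ (fun fila => -(((PySem.List.pyRange 0 m 1).countP (fun c => pvBad g n m (fila, c)) : Int)))]
  have hcount : (pvWin n m).countP (pvBad g n m)
      = ((PySem.List.pyRange 0 n 1).map (fun f => (PySem.List.pyRange 0 m 1).countP (fun c => pvBad g n m (f, c)))).sum := by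
    unfold pvWin
    rw [List.countP_eq_length_filter, List.filter_flatMap, List.length_flatMap]
    simp [← List.countP_eq_length_filter, List.countP_map]
    rfl
  rw [hcount]
  push_cast
  simp [List.map_map, List.sum_neg]
  rfl

lemma pv_mem_foldl_of_step {α : Type} (l : List Int)
    (step : PySem.Set α → Int → PySem.Set α) (R : Int → α → Prop)
    (hstep : ∀ s f x, x ∈ step s f ↔ x ∈ s ∨ R f x) (s0 : PySem.Set α) (x : α) :
    x ∈ l.foldl step s0 ↔ x ∈ s0 ∨ ∃ f ∈ l, R f x := by
  induction l generalizing s0 with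
  | nil => simp
  | cons c cs ih =>
    simp only [List.foldl_cons, ih, hstep, List.mem_cons]
    constructor
    · rintro ((h | h) | ⟨f, hf, h⟩)
      exacts [Or.inl h, Or.inr ⟨c, Or.inl rfl, h⟩, Or.inr ⟨f, Or.inr hf, h⟩]
    · rintro (h | ⟨f, (rfl | hf), h⟩)
      exacts [Or.inl (Or.inl h), Or.inl (Or.inr h), Or.inr ⟨f, hf, h⟩]

lemma pv_nodup_foldl_of_step {α : Type} (l : List Int)
    (step : PySem.Set α → Int → PySem.Set α)
    (hstep : ∀ s f, s.Nodup → (step s f).Nodup) (s0 : PySem.Set α) (h0 : s0.Nodup) :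
    (l.foldl step s0).Nodup := by
  induction l generalizing s0 with
  | nil => exact h0
  | cons c cs ih => exact ih _ (hstep _ _ h0)

-- B's two passes, with the lets of the port zeta-reduced (pv_alt_eq below is `rfl`)
def pvHoriz (g : List (List Int)) (n m : Int) : PySem.Set (Int × Int) :=
  (PySem.List.pyRange 0 n 1).foldl (fun marcadas f =>
    (PySem.List.pyRange 0 (m-1) 1).foldl (fun marcadas c =>
      if pvCell g f c < pvCell g f (c+1) then PySem.Set.add marcadas (f, c)
      else if pvCell g f (c+1) < pvCell g f c then PySem.Set.add marcadas (f, c+1)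
      else marcadas) marcadas) PySem.Set.empty

def pvMarked (g : List (List Int)) (n m : Int) : PySem.Set (Int × Int) :=
  (PySem.List.pyRange 0 (n-1) 1).foldl (fun marcadas f =>
    (PySem.List.pyRange 0 m 1).foldl (fun marcadas c =>
      if pvCell g f c < pvCell g (f+1) c then PySem.Set.add marcadas (f, c)
      else if pvCell g (f+1) c < pvCell g f c then PySem.Set.add marcadas (f+1, c)
      else marcadas) marcadas) (pvHoriz g n m)

lemma pv_alt_eq (g : List (List Int)) (n m : Int) :
    calcular_polarizacion_alt g n m = -(PySem.Set.len (pvMarked g n m)) := rfl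

lemma pv_mem_horiz (g : List (List Int)) (n m : Int) (x : Int × Int) :
    x ∈ pvHoriz g n m ↔ ∃ f ∈ PySem.List.pyRange 0 n 1, ∃ c ∈ PySem.List.pyRange 0 (m-1) 1,
      ((pvCell g f c < pvCell g f (c+1)) ∧ x = (f, c)) ∨
      (¬(pvCell g f c < pvCell g f (c+1)) ∧ pvCell g f (c+1) < pvCell g f c ∧ x = (f, c+1)) := by
  unfold pvHoriz
  rw [pv_mem_foldl_of_step _ _
    (fun f x => ∃ c ∈ PySem.List.pyRange 0 (m-1) 1,
      ((pvCell g f c < pvCell g f (c+1)) ∧ x = (f, c)) ∨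
      (¬(pvCell g f c < pvCell g f (c+1)) ∧ pvCell g f (c+1) < pvCell g f c ∧ x = (f, c+1)))
    (fun s f x => by
      rw [pv_mem_foldl_of_step _ _
        (fun c x => ((pvCell g f c < pvCell g f (c+1)) ∧ x = (f, c)) ∨
          (¬(pvCell g f c < pvCell g f (c+1)) ∧ pvCell g f (c+1) < pvCell g f c ∧ x = (f, c+1)))
        (fun s c x => by
          by_cases h1 : pvCell g f c < pvCell g f (c+1)
          · simp [h1, PySem.Set.mem_add]
          · by_cases h2 : pvCell g f (c+1) < pvCell g f c <;>
              simp [h1, h2, PySem.Set.mem_add])])]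
  simp [PySem.Set.empty]

lemma pv_mem_marked (g : List (List Int)) (n m : Int) (x : Int × Int) :
    x ∈ pvMarked g n m ↔ (x ∈ pvHoriz g n m ∨
      ∃ f ∈ PySem.List.pyRange 0 (n-1) 1, ∃ c ∈ PySem.List.pyRange 0 m 1,
      ((pvCell g f c < pvCell g (f+1) c) ∧ x = (f, c)) ∨
      (¬(pvCell g f c < pvCell g (f+1) c) ∧ pvCell g (f+1) c < pvCell g f c ∧ x = (f+1, c))) := by
  unfold pvMarked
  rw [pv_mem_foldl_of_step _ _
    (fun f x => ∃ c ∈ PySem.List.pyRange 0 m 1,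
      ((pvCell g f c < pvCell g (f+1) c) ∧ x = (f, c)) ∨
      (¬(pvCell g f c < pvCell g (f+1) c) ∧ pvCell g (f+1) c < pvCell g f c ∧ x = (f+1, c)))
    (fun s f x => by
      rw [pv_mem_foldl_of_step _ _
        (fun c x => ((pvCell g f c < pvCell g (f+1) c) ∧ x = (f, c)) ∨
          (¬(pvCell g f c < pvCell g (f+1) c) ∧ pvCell g (f+1) c < pvCell g f c ∧ x = (f+1, c)))
        (fun s c x => by
          by_cases h1 : pvCell g f c < pvCell g (f+1) c
          · simp [h1, PySem.Set.mem_add]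
          · by_cases h2 : pvCell g (f+1) c < pvCell g f c <;>
              simp [h1, h2, PySem.Set.mem_add])])]

lemma pv_mem_marked_iff_win (g : List (List Int)) (n m : Int) (x : Int × Int) :
    x ∈ pvMarked g n m ↔ (x ∈ pvWin n m ∧ pvBad g n m x = true) := by
  obtain ⟨xf, xc⟩ := x
  rw [pv_mem_marked, pv_mem_horiz]
  simp only [pvWin, pvBad, List.mem_flatMap, List.mem_map, PySem.List.mem_pyRange_one,
    Prod.mk.injEq, decide_eq_true_eq, not_lt]
  constructor
  · rintro (⟨f, hf, c, hc, (⟨hlt, he1, he2⟩ | ⟨hge, hlt, he1, he2⟩)⟩ |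
            ⟨f, hf, c, hc, (⟨hlt, he1, he2⟩ | ⟨hge, hlt, he1, he2⟩)⟩) <;> subst he1 <;> subst he2
    · exact ⟨⟨_, ⟨by omega, by omega⟩, _, ⟨by omega, by omega⟩, rfl, rfl⟩,
        Or.inr (Or.inr (Or.inr ⟨by omega, by simpa using hlt⟩))⟩
    · exact ⟨⟨_, ⟨by omega, by omega⟩, _, ⟨by omega, by omega⟩, rfl, rfl⟩,
        Or.inr (Or.inr (Or.inl ⟨by omega, by simpa using hlt⟩))⟩
    · exact ⟨⟨_, ⟨by omega, by omega⟩, _, ⟨by omega, by omega⟩, rfl, rfl⟩,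
        Or.inr (Or.inl ⟨by omega, by simpa using hlt⟩)⟩
    · exact ⟨⟨_, ⟨by omega, by omega⟩, _, ⟨by omega, by omega⟩, rfl, rfl⟩,
        Or.inl ⟨by omega, by simpa using hlt⟩⟩
  · rintro ⟨⟨f, hf, c, hc, he1, he2⟩, hbad⟩
    subst he1; subst he2
    rcases hbad with ⟨h0, hlt⟩ | ⟨h0, hlt⟩ | ⟨h0, hlt⟩ | ⟨h0, hlt⟩
    · exact Or.inr ⟨f-1, ⟨by omega, by omega⟩, c, hc,
        Or.inr ⟨by simpa using le_of_lt hlt, by simpa using hlt, by omega, rfl⟩⟩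
    · exact Or.inr ⟨f, ⟨hf.1, h0⟩, c, hc, Or.inl ⟨hlt, rfl, rfl⟩⟩
    · exact Or.inl ⟨f, hf, c-1, ⟨by omega, by omega⟩,
        Or.inr ⟨by simpa using le_of_lt hlt, by simpa using hlt, rfl, by omega⟩⟩
    · exact Or.inl ⟨f, hf, c, ⟨hc.1, h0⟩, Or.inl ⟨hlt, rfl, rfl⟩⟩

lemma pv_nodup_marked (g : List (List Int)) (n m : Int) : (pvMarked g n m).Nodup := by
  unfold pvMarked
  apply pv_nodup_foldl_of_step
  · intro s f hs
    apply pv_nodup_foldl_of_step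
    · intro s' c hs'
      split_ifs
      exacts [PySem.Set.nodup_add _ _ hs', PySem.Set.nodup_add _ _ hs', hs']
    · exact hs
  · unfold pvHoriz
    apply pv_nodup_foldl_of_step
    · intro s f hs
      apply pv_nodup_foldl_of_step
      · intro s' c hs'
        split_ifs
        exacts [PySem.Set.nodup_add _ _ hs', PySem.Set.nodup_add _ _ hs', hs']
      · exact hs
    · simp [PySem.Set.empty]

lemma pv_nodup_win (n m : Int) : (pvWin n m).Nodup := by
  unfold pvWin
  refine List.nodup_flatMap.2 ⟨fun f _ => (PySem.List.nodup_pyRange_one 0 m).map ?_, ?_⟩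
  · intro a b h
    exact (Prod.ext_iff.mp h).2
  · refine (PySem.List.pairwise_lt_pyRange_one 0 n).imp ?_
    intro a b hab
    intro x hxa hxb
    obtain ⟨ca, _, rfl⟩ := List.mem_map.mp hxa
    obtain ⟨cb, _, hEq⟩ := List.mem_map.mp hxb
    exact absurd (Prod.ext_iff.mp hEq).1 (by omega)

lemma pv_B_eq_count (g : List (List Int)) (n m : Int) :
    calcular_polarizacion_alt g n m = -(((pvWin n m).countP (pvBad g n m) : Int)) := by
  rw [pv_alt_eq]
  have hperm : (pvMarked g n m).Perm ((pvWin n m).filter (pvBad g n m)) :=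
    (List.perm_ext_iff_of_nodup (pv_nodup_marked g n m) ((pv_nodup_win n m).filter _)).mpr
      (by intro x; rw [pv_mem_marked_iff_win]; simp [List.mem_filter])
  simp [PySem.Set.len, hperm.length_eq, List.countP_eq_length_filter]

-- ===== VERDICT (by name: the statement is the Claim_ definition above) =====
theorem calcular_polarizacion_spec : Claim_equal_calcular_polarizacion := by
  intro g n m _ _
  unfold Spec_calcular_polarizacion
  rw [pv_A_eq_count, pv_B_eq_count]
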